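-- pv_equiv track=rewrite | github.com/connordelacruz/webdriver-test-tools | webdriver_test_tools/project/cmd/common.py | parse_test_names
-- ===== SOURCE A (Python) =====
-- def parse_test_names(test_name_args):
--     """Returns a dictionary mapping test case names to a list of test functions
--
--     :param test_name_args: The parsed value of the ``--test`` or ``--skip``
--         arguments
--
--     :return: None if ``test_name_args`` is None, otherwise return a dictionary
--         mapping test case names to a list of test functions to run. If list is
--         empty, no specific function was given for that class
--     """
--     if test_name_args is None:
--         return None
--     class_map = {}
--     for test_name in test_name_args:
--         # Split <module>.[<function>]
--         test_name_parts = test_name.split('.')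
--         class_map.setdefault(test_name_parts[0], [])
--         # If a function was specified, append it to the list of functions
--         if len(test_name_parts) > 1:
--             class_map[test_name_parts[0]].append(test_name_parts[1])
--     return class_map
-- ===== SOURCE B (Python) =====
-- def parse_test_names(test_name_args):
--     if test_name_args is None:
--         return None
--     pairs = [name.split('.') for name in test_name_args]
--     classes = list(dict.fromkeys(p[0] for p in pairs))
--     return {c: [p[1] for p in pairs if p[0] == c and len(p) > 1] for c in classes}
-- ===== Notes on version B (the rewrite author's own statement) =====
-- stated objective: alternative
-- what changed: Replaced the single mutating setdefault/append dict loop by a two-pass functional build: split all names once, take the first-occurrence-deduplicated class keys, and construct each class's function list with a per-class filter comprehension.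
import Mathlib
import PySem

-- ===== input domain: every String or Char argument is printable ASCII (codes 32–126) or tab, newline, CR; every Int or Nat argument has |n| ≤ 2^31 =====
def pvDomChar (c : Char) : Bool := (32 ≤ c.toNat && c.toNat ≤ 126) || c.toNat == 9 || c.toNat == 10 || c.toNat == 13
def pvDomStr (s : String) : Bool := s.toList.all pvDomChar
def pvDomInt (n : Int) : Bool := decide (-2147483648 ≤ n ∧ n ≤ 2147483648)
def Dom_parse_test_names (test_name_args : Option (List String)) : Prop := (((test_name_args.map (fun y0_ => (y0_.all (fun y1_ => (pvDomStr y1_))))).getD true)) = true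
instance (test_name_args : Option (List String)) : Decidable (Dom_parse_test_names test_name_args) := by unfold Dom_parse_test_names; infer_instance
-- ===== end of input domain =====

-- B replaces A's single mutating setdefault/append dict loop by a two-pass functional build
-- (dedup the class keys, then a per-class filter comprehension); same result, alternative structure.

-- name.split('.'): '.' is nonempty so split? always returns some; getD [] just unwraps (exact)
def pvSplit (name : String) : List String := (PySem.Str.split? name ".").getD []

-- ===== PORT A =====
-- one loop iteration of A: split the name, setdefault, conditionally append
-- (parts.getD 0 "" transliterates parts[0]: str.split always returns a nonempty list, so no IndexError)
def pvStepA (d : PySem.Dict String (List String)) (name : String) : PySem.Dict String (List String) :=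
  let parts := pvSplit name
  let d := d.setdefault (parts.getD 0 "") []
  if 1 < parts.length then d.modify (parts.getD 0 "") [] (· ++ [parts.getD 1 ""]) else d

def parse_test_names (test_name_args : Option (List String)) : Option (List (String × List String)) :=
  match test_name_args with
  | none => none
  | some args => some ((args.foldl pvStepA PySem.Dict.empty).items)

-- ===== PORT B =====
def parse_test_names_alt (test_name_args : Option (List String)) : Option (List (String × List String)) :=
  match test_name_args with
  | none => none
  | some args =>
    let pairs := args.map pvSplit
    let classes := PySem.List.dedup (pairs.map (fun p => p.getD 0 ""))
    some (classes.map (fun c =>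
      (c, (pairs.filter (fun p => p.getD 0 "" == c && decide (1 < p.length))).map (fun p => p.getD 1 ""))))

-- ===== PRECONDITION & SPEC =====
def Spec_parse_test_names (test_name_args : Option (List String)) (out : Option (List (String × List String))) : Prop := out = parse_test_names_alt test_name_args
instance (test_name_args : Option (List String)) (out : Option (List (String × List String))) : Decidable (Spec_parse_test_names test_name_args out) := by unfold Spec_parse_test_names; infer_instance

-- ===== CLAIM (what is proved, stated in full; the proofs are below) =====
def Claim_equal_parse_test_names : Prop := ∀ (test_name_args : Option (List String)), Dom_parse_test_names test_name_args → Spec_parse_test_names test_name_args (parse_test_names test_name_args)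

-- ===== LEMMAS AND PROOFS =====

-- the fold over NAMES is the fold over their split PARTS lists
def pvStepP (d : PySem.Dict String (List String)) (p : List String) : PySem.Dict String (List String) :=
  let d := d.setdefault (p.getD 0 "") []
  if 1 < p.length then d.modify (p.getD 0 "") [] (· ++ [p.getD 1 ""]) else d

theorem pvFoldA_eq (args : List String) (d : PySem.Dict String (List String)) :
    args.foldl pvStepA d = (args.map pvSplit).foldl pvStepP d := by
  rw [List.foldl_map]; rfl

theorem pvKeys_setdefault' (d : PySem.Dict String (List String)) (k : String) :
    (d.setdefault k ([] : List String)).keys = PySem.Set.add d.keys k := by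
  rw [PySem.Dict.keys_setdefault, PySem.Set.add_eq_ite]
  by_cases h : k ∈ d.keys
  · simp [h, (PySem.Dict.contains_iff_mem_keys d k).2 h]
  · have : d.contains k = false := by
      cases hc : d.contains k
      · rfl
      · exact absurd ((PySem.Dict.contains_iff_mem_keys d k).1 hc) h
    simp [h, this]

theorem pvKeys_step (d : PySem.Dict String (List String)) (p : List String) :
    (pvStepP d p).keys = PySem.Set.add d.keys (p.getD 0 "") := by
  unfold pvStepP
  split
  · rw [PySem.Dict.keys_modify,
      PySem.Dict.keys_insert_of_contains _ _
        (by rw [PySem.Dict.contains_setdefault]; simp),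
      pvKeys_setdefault']
  · rw [pvKeys_setdefault']

theorem pvKeys_fold (l : List (List String)) (d : PySem.Dict String (List String)) :
    (l.foldl pvStepP d).keys = PySem.Set.update d.keys (l.map (fun p => p.getD 0 "")) := by
  induction l generalizing d with
  | nil => simp [PySem.Set.update]
  | cons p l ih =>
      rw [List.foldl_cons, ih, pvKeys_step, List.map_cons, PySem.Set.update_cons]

theorem pvNodup_fold (l : List (List String)) (d : PySem.Dict String (List String))
    (h : d.keys.Nodup) : (l.foldl pvStepP d).keys.Nodup := by
  induction l generalizing d with
  | nil => exact h
  | cons p l ih =>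
      exact ih _ (by rw [pvKeys_step]; exact PySem.Set.nodup_add _ _ h)

theorem pvGetD_setdefault (d : PySem.Dict String (List String)) (k c : String) :
    (d.setdefault k ([] : List String)).getD c [] = d.getD c [] := by
  by_cases hc : c = k
  · subst hc; rw [PySem.Dict.getD_setdefault_self]
  · cases h : d.contains k
    · rw [PySem.Dict.setdefault_of_not_contains _ _ h,
        PySem.Dict.getD_insert_of_ne _ _ _ hc]
    · rw [PySem.Dict.setdefault_of_contains _ _ h]

theorem pvGetD_step (d : PySem.Dict String (List String)) (p : List String) (c : String) :
    (pvStepP d p).getD c [] =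
      d.getD c [] ++ (if p.getD 0 "" == c && decide (1 < p.length) then [p.getD 1 ""] else []) := by
  unfold pvStepP
  by_cases hc : c = p.getD 0 ""
  · subst hc
    split
    · next h =>
        rw [PySem.Dict.getD_modify_self, pvGetD_setdefault,
          if_pos ((Bool.and_eq_true _ _).mpr ⟨beq_self_eq_true _, decide_eq_true h⟩)]
    · next h =>
        rw [pvGetD_setdefault,
          if_neg (fun hx => h (of_decide_eq_true ((Bool.and_eq_true _ _).mp hx).2)),
          List.append_nil]
  · have hb : ¬ ((p.getD 0 "" == c && decide (1 < p.length)) = true) :=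
      fun hx => hc (eq_of_beq ((Bool.and_eq_true _ _).mp hx).1).symm
    rw [if_neg hb, List.append_nil]
    split
    · rw [PySem.Dict.getD_modify_of_ne _ _ _ hc, pvGetD_setdefault]
    · rw [pvGetD_setdefault]

theorem pvGetD_fold (l : List (List String)) (d : PySem.Dict String (List String)) (c : String) :
    (l.foldl pvStepP d).getD c [] =
      d.getD c [] ++ (l.filter (fun p => p.getD 0 "" == c && decide (1 < p.length))).map (fun p => p.getD 1 "") := by
  induction l generalizing d with
  | nil => simp
  | cons p l ih =>
      rw [List.foldl_cons, ih, pvGetD_step]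
      simp only [List.filter_cons]
      by_cases h : (p.getD 0 "" == c && decide (1 < p.length)) = true
      · rw [if_pos h, if_pos h, List.map_cons, List.append_assoc]; rfl
      · rw [if_neg h, if_neg h, List.append_nil]

-- ===== VERDICT (by name: the statement is the Claim_ definition above) =====
theorem parse_test_names_spec : Claim_equal_parse_test_names := by
  intro test_name_args _
  unfold Spec_parse_test_names parse_test_names parse_test_names_alt
  cases test_name_args with
  | none => rfl
  | some args =>
      simp only []
      congr 1
      rw [pvFoldA_eq]
      have hnd : ((args.map pvSplit).foldl pvStepP PySem.Dict.empty).keys.Nodup :=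
        pvNodup_fold _ _ PySem.Dict.nodup_keys_empty
      rw [PySem.Dict.items_eq_map_keys _ hnd []]
      have hk : ((args.map pvSplit).foldl pvStepP PySem.Dict.empty).keys
          = PySem.List.dedup ((args.map pvSplit).map (fun p => p.getD 0 "")) := by
        rw [pvKeys_fold, PySem.List.dedup_eq_ofList]
        simp [PySem.Dict.keys_empty, PySem.Set.update_nil_left]
      rw [hk]
      refine List.map_congr_left (fun c _ => ?_)
      rw [pvGetD_fold]
      simp [PySem.Dict.getD_empty]
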